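-- pv_equiv track=rewrite | github.com/mabagheri/PythonPractice | DFS_BFS/DFS_and_BFS.py | bfs_is_reachable_count
-- ===== SOURCE A (Python) =====
-- def bfs_is_reachable_count(graph, s, d):
--     """
--     This is the code from below, that I modified to return number of ways
--     https://www.geeksforgeeks.org/find-if-there-is-a-path-between-two-vertices-in-a-given-graph/ (with small modification)
--     """
--     visited, queue = set(), [s]
--     count = 0
--     visited.add(s)
--     while queue:
--         vertex = queue.pop(0)
--
--         # # Else, continue to do BFS
--         for i in graph[vertex] - visited:
--             if i == d:
--                 count += 1  # yield
--             else:
--                 queue.append(i)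
--                 visited.add(i)
--
--     # If BFS is complete without visited d
--     return count
-- ===== SOURCE B (Python) =====
-- def bfs_is_reachable_count(graph, s, d):
--     # Two-phase version: a plain reachability BFS collects the visited set
--     # (never stepping through d), then one scan counts the collected vertices
--     # that still have an unvisited edge to d.
--     visited = {s}
--     queue = [s]
--     while queue:
--         v = queue.pop(0)
--         new = [w for w in graph[v] - visited if w != d]
--         queue.extend(new)
--         visited.update(new)
--     return sum(1 for v in visited if d in graph[v] - visited)
-- ===== Notes on version B (the rewrite author's own statement) =====
-- stated objective: alternative
-- what changed: A fuses counting into the BFS (per popped vertex it scans graph[v]-visited, branching element-wise to count hits on d or enqueue); B decomposes it into a plain reachability BFS that collects the visited set via whole-list extend/update of the non-d frontier, followed by a separate scan counting collected vertices with an unvisited edge to d. Pre_ excludes exactly the inputs where A raises KeyError (a reachable vertex missing from graph).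
import Mathlib
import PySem

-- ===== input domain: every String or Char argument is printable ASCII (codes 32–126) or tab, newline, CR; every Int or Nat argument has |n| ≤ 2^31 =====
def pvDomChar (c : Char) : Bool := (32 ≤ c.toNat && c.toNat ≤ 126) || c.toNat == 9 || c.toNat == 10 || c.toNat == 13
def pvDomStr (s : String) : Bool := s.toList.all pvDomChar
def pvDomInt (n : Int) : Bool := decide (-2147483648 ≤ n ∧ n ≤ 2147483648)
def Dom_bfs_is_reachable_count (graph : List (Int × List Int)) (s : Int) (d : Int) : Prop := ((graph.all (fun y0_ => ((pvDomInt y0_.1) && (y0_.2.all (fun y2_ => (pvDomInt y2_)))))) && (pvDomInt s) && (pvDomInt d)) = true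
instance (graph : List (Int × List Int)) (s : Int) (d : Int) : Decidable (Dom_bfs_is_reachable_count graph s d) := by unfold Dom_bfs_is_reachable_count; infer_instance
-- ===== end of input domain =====

-- B splits A's fused BFS-and-count into a plain reachability BFS followed by a
-- separate scan counting collected vertices with an unvisited edge to d; same
-- return value (alternative decomposition, no speed claim).

-- ===== PORT A =====
-- The Python 'while queue' loop, with fuel; fuel (total adjacency size + 2) is an
-- upper bound on the number of loop iterations, since every enqueued vertex is a
-- fresh element of some adjacency list. 'none' = KeyError (graph[vertex] missing).
def bfsLoopA (G : PySem.Dict Int (List Int)) (d : Int) :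
    Nat → List Int → PySem.Set Int → Int → Option Int
  | 0, _, _, _ => none
  | fuel+1, queue, visited, count =>
    match queue with
    | [] => some count
    | vertex :: rest =>
      match G.get? vertex with
      | none => none
      | some adj =>
        let st := ((PySem.Set.ofList adj).diff visited).foldl
          (fun (st : List Int × PySem.Set Int × Int) i =>
            if i == d then (st.1, st.2.1, st.2.2 + 1)
            else (st.1 ++ [i], PySem.Set.add st.2.1 i, st.2.2))
          (rest, visited, count)
        bfsLoopA G d fuel st.1 st.2.1 st.2.2

def bfs_is_reachable_count (graph : List (Int × List Int)) (s : Int) (d : Int) : Int :=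
  (bfsLoopA (PySem.Dict.mk graph) d ((graph.flatMap Prod.snd).length + 2)
      [s] (PySem.Set.add PySem.Set.empty s) 0).getD 0

-- ===== PORT B =====
-- same fuel bound for Source B's identical 'while queue' loop; 'none' = KeyError
def bfsLoopB (G : PySem.Dict Int (List Int)) (d : Int) :
    Nat → List Int → PySem.Set Int → Option (PySem.Set Int)
  | 0, _, _ => none
  | fuel+1, queue, visited =>
    match queue with
    | [] => some visited
    | vertex :: rest =>
      match G.get? vertex with
      | none => none
      | some adj =>
        -- new = [w for w in graph[v] - visited if w != d]
        let new := ((PySem.Set.ofList adj).diff visited).filter (fun w => w != d)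
        bfsLoopB G d fuel (rest ++ new) (PySem.Set.update visited new)

-- d in graph[v]  (the [] default is never reached once the BFS completed:
-- every collected vertex was popped, so its lookup succeeded)
def pvAdjHasD (G : PySem.Dict Int (List Int)) (d v : Int) : Bool :=
  ((G.get? v).getD []).contains d

def bfs_is_reachable_count_alt (graph : List (Int × List Int)) (s : Int) (d : Int) : Int :=
  match bfsLoopB (PySem.Dict.mk graph) d ((graph.flatMap Prod.snd).length + 2)
      [s] (PySem.Set.ofList [s]) with
  | none => 0  -- Python raises KeyError here; excluded by Pre_
  | some visited =>
    -- sum(1 for v in visited if d in graph[v] - visited)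
    (visited.countP (fun v => pvAdjHasD (PySem.Dict.mk graph) d v
        && !(PySem.Set.contains visited d)) : Int)

-- ===== PRECONDITION & SPEC =====
-- Pre_ excludes exactly the inputs on which Python raises KeyError: those where
-- the traversal can reach (from s, stepping through key vertices, never through d)
-- a vertex that is not a key of graph. The reachable set is the fixpoint of one
-- edge-expansion step, reached after at most (total adjacency size + 1) steps.
def pvReachStep (graph : List (Int × List Int)) (d : Int) (R : PySem.Set Int) : PySem.Set Int :=
  PySem.Set.update R
    (((R.filterMap (fun v => (PySem.Dict.mk graph).get? v)).flatten).filter (fun w => w != d))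

def pvReachSet (graph : List (Int × List Int)) (s : Int) (d : Int) : PySem.Set Int :=
  (pvReachStep graph d)^[(graph.flatMap Prod.snd).length + 1] (PySem.Set.ofList [s])

-- (The proved equivalence does not need Pre_: the two ports agree on every input,
-- both mapping the missing-key case to 0; Pre_ only delimits where Python A returns.)
def Pre_bfs_is_reachable_count (graph : List (Int × List Int)) (s : Int) (d : Int) : Prop :=
  ∀ v ∈ pvReachSet graph s d, (PySem.Dict.mk graph).contains v = true
instance (graph : List (Int × List Int)) (s : Int) (d : Int) : Decidable (Pre_bfs_is_reachable_count graph s d) := by unfold Pre_bfs_is_reachable_count; infer_instance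

def pvWitness_bfs_is_reachable_count : (List (Int × List Int)) × Int × Int :=
  ([(0, [1, 2]), (1, [2]), (2, [0])], 0, 2)

def Spec_bfs_is_reachable_count (graph : List (Int × List Int)) (s : Int) (d : Int) (out : Int) : Prop := out = bfs_is_reachable_count_alt graph s d
instance (graph : List (Int × List Int)) (s : Int) (d : Int) (out : Int) : Decidable (Spec_bfs_is_reachable_count graph s d out) := by unfold Spec_bfs_is_reachable_count; infer_instance

-- ===== CLAIM (what is proved, stated in full; the proofs are below) =====
def Claim_equal_bfs_is_reachable_count : Prop := ∀ (graph : List (Int × List Int)) (s : Int) (d : Int), Dom_bfs_is_reachable_count graph s d → Pre_bfs_is_reachable_count graph s d → Spec_bfs_is_reachable_count graph s d (bfs_is_reachable_count graph s d)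

-- ===== LEMMAS AND PROOFS =====

lemma pvFoldlA_char (d : Int) (ds : List Int) :
    ∀ (q : List Int) (vis : PySem.Set Int) (c : Int),
    ds.foldl
      (fun (st : List Int × PySem.Set Int × Int) i =>
        if i == d then (st.1, st.2.1, st.2.2 + 1)
        else (st.1 ++ [i], PySem.Set.add st.2.1 i, st.2.2)) (q, vis, c)
    = (q ++ ds.filter (fun i => i != d),
       PySem.Set.update vis (ds.filter (fun i => i != d)),
       c + (ds.countP (fun i => i == d) : Int)) := by
  induction ds with
  | nil => intro q vis c; simp
  | cons i ds ih =>
    intro q vis c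
    by_cases hi : i = d
    · subst hi
      simp only [List.foldl_cons, beq_self_eq_true, if_pos, List.filter_cons, bne_self_eq_false,
        Bool.false_eq_true, List.countP_cons, beq_self_eq_true]
      rw [ih]
      simp only [Prod.mk.injEq]
      refine ⟨rfl, rfl, by push_cast; ring⟩
    · have hbe : (i == d) = false := beq_eq_false_iff_ne.mpr hi
      have hbn : (i != d) = true := by simp [bne, hbe]
      simp only [List.foldl_cons, hbe, Bool.false_eq_true, if_false, List.filter_cons, hbn,
        if_pos, List.countP_cons]
      rw [ih]
      simp only [Prod.mk.injEq]
      refine ⟨by simp, ?_, by simp [hbe]⟩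
      rw [PySem.Set.update_cons]

lemma pvLoopB_mono (G : PySem.Dict Int (List Int)) (d : Int) :
    ∀ (f : Nat) (q : List Int) (vis V : PySem.Set Int),
    bfsLoopB G d f q vis = some V → ∀ x ∈ vis, x ∈ V := by
  intro f
  induction f with
  | zero => intro q vis V h; simp [bfsLoopB] at h
  | succ f ih =>
    intro q vis V h x hx
    match q with
    | [] =>
      simp only [bfsLoopB, Option.some.injEq] at h
      exact h ▸ hx
    | v :: rest =>
      simp only [bfsLoopB] at h
      cases hg : G.get? v with
      | none => rw [hg] at h; simp at h
      | some adj =>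
        rw [hg] at h
        simp only at h
        exact ih _ _ _ h x ((PySem.Set.mem_update _ _ _).mpr (Or.inl hx))

lemma pvLoopB_nodup (G : PySem.Dict Int (List Int)) (d : Int) :
    ∀ (f : Nat) (q : List Int) (vis V : PySem.Set Int),
    bfsLoopB G d f q vis = some V → vis.Nodup → V.Nodup := by
  intro f
  induction f with
  | zero => intro q vis V h; simp [bfsLoopB] at h
  | succ f ih =>
    intro q vis V h hn
    match q with
    | [] =>
      simp only [bfsLoopB, Option.some.injEq] at h
      exact h ▸ hn
    | v :: rest =>
      simp only [bfsLoopB] at h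
      cases hg : G.get? v with
      | none => rw [hg] at h; simp at h
      | some adj =>
        rw [hg] at h
        simp only at h
        exact ih _ _ _ h (PySem.Set.nodup_update _ _ hn)

-- The BFS never adds d: members of the final set not in the initial set are ≠ d.
lemma pvLoopB_no_d (G : PySem.Dict Int (List Int)) (d : Int) :
    ∀ (f : Nat) (q : List Int) (vis V : PySem.Set Int),
    bfsLoopB G d f q vis = some V → d ∉ vis → d ∉ V := by
  intro f
  induction f with
  | zero => intro q vis V h; simp [bfsLoopB] at h
  | succ f ih =>
    intro q vis V h hd
    match q with
    | [] =>
      simp only [bfsLoopB, Option.some.injEq] at h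
      exact h ▸ hd
    | v :: rest =>
      simp only [bfsLoopB] at h
      cases hg : G.get? v with
      | none => rw [hg] at h; simp at h
      | some adj =>
        rw [hg] at h
        simp only at h
        refine ih _ _ _ h ?_
        intro hmem
        rcases (PySem.Set.mem_update _ _ _).mp hmem with h1 | h1
        · exact hd h1
        · have := List.of_mem_filter h1
          simp at this

lemma pvCountP_split (p q r : Int → Bool)
    (h : ∀ x, (p x = (q x || r x)) ∧ ¬(q x = true ∧ r x = true)) :
    ∀ V : List Int, V.countP p = V.countP q + V.countP r := by
  intro V
  induction V with
  | nil => simp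
  | cons x V ih =>
    simp only [List.countP_cons, ih]
    obtain ⟨h1, h2⟩ := h x
    cases hq : q x <;> cases hr : r x <;> simp [hq, hr] at h1 h2 ⊢ <;> simp [h1] <;> omega

lemma pvCountP_subset_nodup (p : Int → Bool) (V w : List Int)
    (hV : V.Nodup) (hw : w.Nodup) (hsub : ∀ x ∈ w, x ∈ V) :
    V.countP (fun x => p x && decide (x ∈ w)) = w.countP p := by
  have h1 : V.countP (fun x => p x && decide (x ∈ w))
      = ((V.filter (fun x => decide (x ∈ w))).countP p) := by
    rw [List.countP_filter]
  rw [h1]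
  have hperm : (V.filter (fun x => decide (x ∈ w))).Perm w := by
    rw [List.perm_ext_iff_of_nodup (hV.filter _) hw]
    intro a
    simp only [List.mem_filter, decide_eq_true_eq]
    exact ⟨fun ha => ha.2, fun ha => ⟨hsub a ha, ha⟩⟩
  exact hperm.countP_eq p

lemma pvLoop_rel (G : PySem.Dict Int (List Int)) (d : Int) :
    ∀ (f : Nat) (q : List Int) (vis : PySem.Set Int) (c : Int), vis.Nodup →
    bfsLoopA G d f q vis c
      = (bfsLoopB G d f q vis).map (fun V =>
          c + (if vis.contains d then 0 else
            ((q.countP (fun v => pvAdjHasD G d v) : Int)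
              + (V.countP (fun v => pvAdjHasD G d v && !(vis.contains v)) : Int)))) := by
  intro f
  induction f with
  | zero => intro q vis c hn; simp [bfsLoopA, bfsLoopB]
  | succ f ih =>
    intro q vis c hn
    match q with
    | [] =>
      simp only [bfsLoopA, bfsLoopB, Option.map_some, Option.some.injEq]
      have hz : vis.countP (fun v => pvAdjHasD G d v && !(vis.contains v)) = 0 := by
        apply List.countP_eq_zero.mpr
        intro v hv
        have : vis.contains v = true := (PySem.Set.contains_iff vis v).mpr hv
        simp [this]
        exact fun _ => hv
      rw [hz]
      split_ifs <;> simp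
    | v :: rest =>
      simp only [bfsLoopA, bfsLoopB]
      cases hg : G.get? v with
      | none => simp
      | some adj =>
        simp only
        rw [pvFoldlA_char]
        set ds := (PySem.Set.ofList adj).diff vis with hds
        set new := ds.filter (fun i => i != d) with hnew
        have hdsnd : ds.Nodup := PySem.Set.nodup_diff _ _ (PySem.Set.nodup_ofList adj)
        have hnewnd : new.Nodup := hdsnd.filter _
        have hnewvis : ∀ x ∈ new, x ∉ vis := by
          intro x hx
          have := List.mem_of_mem_filter hx
          exact ((PySem.Set.mem_diff _ _ _).mp this).2
        have hvis' := PySem.Set.nodup_update vis new hn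
        rw [ih (rest ++ new) (PySem.Set.update vis new) _ hvis']
        cases hB : bfsLoopB G d f (rest ++ new) (PySem.Set.update vis new) with
        | none => simp
        | some V =>
          simp only [Option.map_some, Option.some.injEq]
          have hVnd : V.Nodup := pvLoopB_nodup G d f _ _ _ hB hvis'
          have hmono : ∀ x ∈ PySem.Set.update vis new, x ∈ V := pvLoopB_mono G d f _ _ _ hB
          have hnewV : ∀ x ∈ new, x ∈ V := fun x hx =>
            hmono x ((PySem.Set.mem_update _ _ _).mpr (Or.inr hx))
          have hcontains' : (PySem.Set.update vis new).contains d = vis.contains d := by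
            by_cases hdv : d ∈ vis
            · simp [(PySem.Set.contains_iff _ _).mpr hdv,
                (PySem.Set.contains_iff _ _).mpr ((PySem.Set.mem_update _ _ _).mpr (Or.inl hdv))]
              tauto
            · have hdnew : d ∉ new := by
                intro hx
                have := List.of_mem_filter hx
                simp at this
              have h1 : (PySem.Set.update vis new).contains d = false := by
                rw [Bool.eq_false_iff]
                intro hc
                rcases (PySem.Set.mem_update _ _ _).mp ((PySem.Set.contains_iff _ _).mp hc) with h | h
                · exact hdv h
                · exact hdnew h
              have h2 : vis.contains d = false := by
                rw [Bool.eq_false_iff]; intro hc; exact hdv ((PySem.Set.contains_iff _ _).mp hc)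
              rw [h1, h2]
          rw [hcontains']
          by_cases hd : vis.contains d = true
          · -- d already visited (d = s): count never moves
            rw [if_pos hd, if_pos hd]
            have hz : ds.countP (fun i => i == d) = 0 := by
              apply List.countP_eq_zero.mpr
              intro i hi hbeq
              have hid : i = d := by simpa using hbeq
              subst hid
              exact ((PySem.Set.mem_diff _ _ _).mp hi).2 ((PySem.Set.contains_iff _ _).mp hd)
            rw [hz]
            push_cast
            ring
          · rw [if_neg hd, if_neg hd]
            have hdvis : d ∉ vis := fun hx => hd ((PySem.Set.contains_iff _ _).mpr hx)
            -- count of d in ds = whether v's adjacency contains d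
            have hcnt : ds.countP (fun i => i == d) = (if pvAdjHasD G d v then 1 else 0) := by
              have : ds.countP (fun i => i == d) = ds.count d := rfl
              rw [this]
              by_cases hmem : d ∈ ds
              · rw [List.count_eq_one_of_mem hdsnd hmem]
                have : pvAdjHasD G d v = true := by
                  have := ((PySem.Set.mem_diff _ _ _).mp hmem).1
                  have hda : d ∈ adj := (PySem.Set.mem_ofList _ _).mp this
                  simp [pvAdjHasD, hg, List.contains_iff_mem, hda]
                simp [this]
              · rw [List.count_eq_zero_of_not_mem hmem]
                have : pvAdjHasD G d v = false := by
                  rw [Bool.eq_false_iff]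
                  intro hc
                  have hda : d ∈ adj := by
                    simpa [pvAdjHasD, hg, List.contains_iff_mem] using hc
                  exact hmem ((PySem.Set.mem_diff _ _ _).mpr ⟨(PySem.Set.mem_ofList _ _).mpr hda, hdvis⟩)
                simp [this]
            rw [hcnt]
            -- split the count over V
            have hsplit : V.countP (fun x => pvAdjHasD G d x && !(vis.contains x))
                = V.countP (fun x => pvAdjHasD G d x && !((PySem.Set.update vis new).contains x))
                  + V.countP (fun x => pvAdjHasD G d x && decide (x ∈ new)) := by
              apply pvCountP_split
              intro x
              by_cases hxn : x ∈ new
              · have hxv : x ∉ vis := hnewvis x hxn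
                have c1 : vis.contains x = false := by
                  rw [Bool.eq_false_iff]; intro hc; exact hxv ((PySem.Set.contains_iff _ _).mp hc)
                have c2 : (PySem.Set.update vis new).contains x = true :=
                  (PySem.Set.contains_iff _ _).mpr ((PySem.Set.mem_update _ _ _).mpr (Or.inr hxn))
                constructor
                · simp [c1, c2, hxn]
                  tauto
                · simp [c2]
                  tauto
              · have c2 : (PySem.Set.update vis new).contains x = vis.contains x := by
                  by_cases hxv : x ∈ vis
                  · simp [(PySem.Set.contains_iff _ _).mpr hxv,
                      (PySem.Set.contains_iff _ _).mpr ((PySem.Set.mem_update _ _ _).mpr (Or.inl hxv))]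
                    tauto
                  · have e1 : (PySem.Set.update vis new).contains x = false := by
                      rw [Bool.eq_false_iff]
                      intro hc
                      rcases (PySem.Set.mem_update _ _ _).mp ((PySem.Set.contains_iff _ _).mp hc) with h | h
                      · exact hxv h
                      · exact hxn h
                    have e2 : vis.contains x = false := by
                      rw [Bool.eq_false_iff]; intro hc; exact hxv ((PySem.Set.contains_iff _ _).mp hc)
                    rw [e1, e2]
                constructor
                · simp [c2, hxn]
                · simp [hxn]
            have hinner : V.countP (fun x => pvAdjHasD G d x && decide (x ∈ new))
                = new.countP (fun x => pvAdjHasD G d x) :=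
              pvCountP_subset_nodup _ V new hVnd hnewnd hnewV
            rw [hsplit, hinner, List.countP_append, List.countP_cons]
            push_cast
            ring

lemma pvEqual (graph : List (Int × List Int)) (s : Int) (d : Int) :
    bfs_is_reachable_count graph s d = bfs_is_reachable_count_alt graph s d := by
  unfold bfs_is_reachable_count bfs_is_reachable_count_alt
  have h0 : PySem.Set.add PySem.Set.empty s = [s] := rfl
  have h1 : PySem.Set.ofList [s] = ([s] : PySem.Set Int) := rfl
  rw [h0, h1]
  rw [pvLoop_rel (PySem.Dict.mk graph) d _ [s] [s] 0 (List.nodup_singleton s)]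
  cases hB : bfsLoopB (PySem.Dict.mk graph) d ((graph.flatMap Prod.snd).length + 2) [s] [s] with
  | none => simp
  | some V =>
    simp only [Option.map_some, Option.getD_some]
    by_cases hsd : s = d
    · subst hsd
      have hc : PySem.Set.contains ([s] : PySem.Set Int) s = true :=
        (PySem.Set.contains_iff _ _).mpr (List.mem_singleton.mpr rfl)
      have hsV : s ∈ V := pvLoopB_mono _ _ _ _ _ _ hB s (List.mem_singleton.mpr rfl)
      have hcV : PySem.Set.contains V s = true := (PySem.Set.contains_iff _ _).mpr hsV
      simp only [hc, hcV, Bool.not_true, Bool.and_false, if_true]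
      simp
    · have hc : PySem.Set.contains ([s] : PySem.Set Int) d = false := by
        rw [Bool.eq_false_iff]
        intro hcc
        exact hsd ((List.mem_singleton.mp ((PySem.Set.contains_iff _ _).mp hcc))).symm
      have hdV : d ∉ V := pvLoopB_no_d _ _ _ _ _ _ hB
        (fun hx => hsd (List.mem_singleton.mp hx).symm)
      have hcV : PySem.Set.contains V d = false := by
        rw [Bool.eq_false_iff]; intro hcc; exact hdV ((PySem.Set.contains_iff _ _).mp hcc)
      rw [hc, hcV]
      simp only [Bool.false_eq_true, if_false, Bool.not_false, Bool.and_true]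
      have hsV : s ∈ V := pvLoopB_mono _ _ _ _ _ _ hB s (List.mem_singleton.mpr rfl)
      have hVnd : V.Nodup := pvLoopB_nodup _ _ _ _ _ _ hB (List.nodup_singleton s)
      have hsplit : V.countP (fun x => pvAdjHasD (PySem.Dict.mk graph) d x)
          = V.countP (fun x => pvAdjHasD (PySem.Dict.mk graph) d x && decide (x ∈ [s]))
            + V.countP (fun x => pvAdjHasD (PySem.Dict.mk graph) d x && !(PySem.Set.contains ([s] : PySem.Set Int) x)) := by
        apply pvCountP_split
        intro x
        by_cases hxs : x = s
        · subst hxs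
          have : PySem.Set.contains ([x] : PySem.Set Int) x = true :=
            (PySem.Set.contains_iff _ _).mpr (List.mem_singleton.mpr rfl)
          constructor
          · simp [this]
          · simp [this]
        · have : PySem.Set.contains ([s] : PySem.Set Int) x = false := by
            rw [Bool.eq_false_iff]
            intro hcc
            exact hxs (List.mem_singleton.mp ((PySem.Set.contains_iff _ _).mp hcc))
          constructor
          · simp [this, hxs]
          · simp [this, hxs]
      have hone : V.countP (fun x => pvAdjHasD (PySem.Dict.mk graph) d x && decide (x ∈ [s]))
          = [s].countP (fun x => pvAdjHasD (PySem.Dict.mk graph) d x) :=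
        pvCountP_subset_nodup _ V [s] hVnd (List.nodup_singleton s)
          (fun x hx => (List.mem_singleton.mp hx) ▸ hsV)
      rw [hsplit, hone]
      push_cast
      ring

-- ===== VERDICT (by name: the statement is the Claim_ definition above) =====
theorem bfs_is_reachable_count_spec : Claim_equal_bfs_is_reachable_count := by
  intro graph s d _ _
  exact pvEqual graph s d
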